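-- pv_equiv track=rewrite | github.com/vijayshiv/VS-Code | Python Programming/Programming Practice/Strings/ques5.py | separate_lower_upper
-- ===== SOURCE A (Python) =====
-- def separate_lower_upper(str):
--     l = list(str)
--
--     resupper = []
--     reslower = []
--     for i in range(len(l)):
--         if 'A' <= l[i] <= 'Z':
--             resupper.append(l[i])
--         else:
--             reslower.append(l[i])
--     result = reslower + resupper
--
--     # Convert the list to a string
--     result_str = ''.join(result)
--     return result_str
-- ===== SOURCE B (Python) =====
-- def separate_lower_upper(str):
--     # stable sort: non-uppercase chars (key False) first, uppercase (key True) after,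
--     # each group keeping its original order
--     return ''.join(sorted(str, key=lambda c: 'A' <= c <= 'Z'))
-- ===== Notes on version B (the rewrite author's own statement) =====
-- stated objective: idiomatic
-- what changed: Replaces the index loop with two append-accumulators and list concatenation by a single stable sort keyed on the uppercase predicate (False < True), so non-uppercase characters come first in order and uppercase follow in order.
import Mathlib
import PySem

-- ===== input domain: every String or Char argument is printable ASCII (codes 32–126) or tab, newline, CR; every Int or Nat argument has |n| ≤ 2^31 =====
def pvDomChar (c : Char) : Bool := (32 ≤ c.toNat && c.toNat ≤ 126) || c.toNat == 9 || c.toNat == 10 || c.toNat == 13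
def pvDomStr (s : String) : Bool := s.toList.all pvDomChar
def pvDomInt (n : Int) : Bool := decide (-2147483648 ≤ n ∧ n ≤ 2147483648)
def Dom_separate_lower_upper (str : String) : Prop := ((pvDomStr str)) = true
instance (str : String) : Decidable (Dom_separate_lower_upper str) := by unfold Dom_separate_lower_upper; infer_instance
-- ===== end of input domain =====

-- B replaces A's two-accumulator index loop by one stable sort keyed on the
-- uppercase predicate (idiomatic; same result, proved equal on all strings).


-- ===== PORT A =====
-- for i in range(len(l)): append l[i] to resupper / reslower; result = reslower + resupper
def separate_lower_upper (str : String) : String :=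
  let l := str.toList
  let res := (PySem.List.pyRange 0 (PySem.List.len l)).foldl
    (fun (acc : List Char × List Char) i =>
      let c := PySem.List.pyGetD l i ' '   -- index always in range, default never used
      if 'A' ≤ c ∧ c ≤ 'Z' then (acc.1 ++ [c], acc.2) else (acc.1, acc.2 ++ [c]))
    ([], [])
  String.ofList (res.2 ++ res.1)

-- ===== PORT B =====
-- ''.join(sorted(str, key=lambda c: 'A' <= c <= 'Z'))
def separate_lower_upper_alt (str : String) : String :=
  String.ofList (PySem.List.sorted str.toList (fun c => decide ('A' ≤ c ∧ c ≤ 'Z')) false)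

-- ===== PRECONDITION & SPEC =====
def Spec_separate_lower_upper (str : String) (out : String) : Prop := out = separate_lower_upper_alt str
instance (str : String) (out : String) : Decidable (Spec_separate_lower_upper str out) := by unfold Spec_separate_lower_upper; infer_instance

-- ===== CLAIM (what is proved, stated in full; the proofs are below) =====
def Claim_equal_separate_lower_upper : Prop := ∀ (str : String), Dom_separate_lower_upper str → Spec_separate_lower_upper str (separate_lower_upper str)

-- ===== LEMMAS AND PROOFS =====

-- inserting a low-key element into "lows ++ highs" puts it between the groups
theorem insertBy_low (key : Char → Bool) (x : Char) (hx : key x = false)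
    (low up : List Char) (hlow : ∀ y ∈ low, key y = false) (hup : ∀ y ∈ up, key y = true) :
    PySem.List.insertBy (fun a b => decide (key a < key b)) x (low ++ up)
      = low ++ x :: up := by
  induction low with
  | nil =>
    cases up with
    | nil => simp [PySem.List.insertBy]
    | cons u us =>
      have hu : key u = true := hup u (by simp)
      simp [PySem.List.insertBy, hx, hu]
  | cons a low ih =>
    have ha : key a = false := hlow a (by simp)
    have := ih (fun y hy => hlow y (by simp [hy]))
    simp [PySem.List.insertBy, hx, ha, this]

-- inserting a high-key element appends it at the end
theorem insertBy_high (key : Char → Bool) (x : Char) (hx : key x = true)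
    (ys : List Char) :
    PySem.List.insertBy (fun a b => decide (key a < key b)) x ys = ys ++ [x] := by
  apply PySem.List.insertBy_of_forall_not_before
  intro y _
  simp [hx]

-- the insertion-sort loop keeps the accumulator partitioned: lows then highs
theorem foldl_insertBy_partition (key : Char → Bool) (xs : List Char) :
    ∀ (low up : List Char), (∀ y ∈ low, key y = false) → (∀ y ∈ up, key y = true) →
    xs.foldl (fun acc x => PySem.List.insertBy (fun a b => decide (key a < key b)) x acc) (low ++ up)
      = (low ++ xs.filter (fun c => !key c)) ++ (up ++ xs.filter key) := by
  induction xs with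
  | nil => intro low up _ _; simp
  | cons x xs ih =>
    intro low up hlow hup
    by_cases hx : key x = true
    · have h1 : PySem.List.insertBy (fun a b => decide (key a < key b)) x (low ++ up)
          = low ++ (up ++ [x]) := by
        rw [insertBy_high key x hx]; simp
      have h2 := ih low (up ++ [x]) hlow (by
        intro y hy
        rcases List.mem_append.mp hy with h | h
        · exact hup y h
        · simp at h; simpa [h] using hx)
      simp only [List.foldl_cons, h1, h2, List.filter_cons, hx]
      simp
    · have hx' : key x = false := by simpa using hx
      have h1 : PySem.List.insertBy (fun a b => decide (key a < key b)) x (low ++ up)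
          = (low ++ [x]) ++ up := by
        rw [insertBy_low key x hx' low up hlow hup]; simp
      have h2 := ih (low ++ [x]) up (by
        intro y hy
        rcases List.mem_append.mp hy with h | h
        · exact hlow y h
        · simp at h; simpa [h] using hx') hup
      simp only [List.foldl_cons, h1, h2, List.filter_cons, hx']
      simp

-- sorting by a Bool key is the stable partition
theorem sorted_bool_key (key : Char → Bool) (xs : List Char) :
    PySem.List.sorted xs key false = xs.filter (fun c => !key c) ++ xs.filter key := by
  have := foldl_insertBy_partition key xs [] [] (by simp) (by simp)
  simpa [PySem.List.sorted_eq_foldl_insertBy] using this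

-- A's loop computes the two filters
theorem loopA_filters (key : Char → Bool) (xs : List Char) :
    ∀ (u l : List Char),
    xs.foldl (fun (acc : List Char × List Char) c =>
        if key c then (acc.1 ++ [c], acc.2) else (acc.1, acc.2 ++ [c])) (u, l)
      = (u ++ xs.filter key, l ++ xs.filter (fun c => !key c)) := by
  induction xs with
  | nil => intro u l; simp
  | cons x xs ih =>
    intro u l
    by_cases hx : key x = true
    · simp [hx, ih]
    · have hx' : key x = false := by simpa using hx
      simp [hx', ih]

-- ===== VERDICT (by name: the statement is the Claim_ definition above) =====
theorem separate_lower_upper_spec : Claim_equal_separate_lower_upper := by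
  intro str _
  unfold Spec_separate_lower_upper separate_lower_upper separate_lower_upper_alt
  set key : Char → Bool := fun c => decide ('A' ≤ c ∧ c ≤ 'Z') with hkey
  have hrange : (PySem.List.pyRange 0 (PySem.List.len str.toList)).foldl
      (fun (acc : List Char × List Char) i =>
        let c := PySem.List.pyGetD str.toList i ' '
        if 'A' ≤ c ∧ c ≤ 'Z' then (acc.1 ++ [c], acc.2) else (acc.1, acc.2 ++ [c]))
      ([], [])
      = str.toList.foldl (fun (acc : List Char × List Char) c =>
          if key c then (acc.1 ++ [c], acc.2) else (acc.1, acc.2 ++ [c])) ([], []) := by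
    have := PySem.List.foldl_pyRange_pyGetD str.toList ' '
      (fun (acc : List Char × List Char) c =>
        if key c then (acc.1 ++ [c], acc.2) else (acc.1, acc.2 ++ [c])) ([], [])
      (a := 0) le_rfl
    simpa [hkey] using this
  simp only [hrange, loopA_filters key str.toList [] [], sorted_bool_key key str.toList]
  simp
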